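-- pv_equiv track=rewrite | github.com/tkddls23/BaekJoon | sumi/brute_force/1062.py | count_read_word
-- ===== SOURCE A (Python) =====
-- def count_read_word(words,teach_word):
--     cnt = 0
--     for word in words:
--         isRead=True
--         for x in list(word):
--             if x not in teach_word:
--                 isRead = False
--                 break
--         if isRead:
--             cnt+=1
--     return cnt
-- ===== SOURCE B (Python) =====
-- def count_read_word(words, teach_word):
--     # Build one translation table that deletes every teachable letter
--     # (only single-character entries of teach_word can ever equal a letter).
--     table = {ord(t): None for t in teach_word if len(t) == 1}
--     # A word is readable exactly when erasing its teachable letters leaves nothing.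
--     return sum(1 for word in words if not word.translate(table))
-- ===== Notes on version B (the rewrite author's own statement) =====
-- stated objective: alternative
-- what changed: Instead of A's nested membership loop with a break and a boolean flag, B builds one character-deletion translation table from teach_word and counts the words whose translation (erasing all teachable letters) is the empty string.
import Mathlib
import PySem

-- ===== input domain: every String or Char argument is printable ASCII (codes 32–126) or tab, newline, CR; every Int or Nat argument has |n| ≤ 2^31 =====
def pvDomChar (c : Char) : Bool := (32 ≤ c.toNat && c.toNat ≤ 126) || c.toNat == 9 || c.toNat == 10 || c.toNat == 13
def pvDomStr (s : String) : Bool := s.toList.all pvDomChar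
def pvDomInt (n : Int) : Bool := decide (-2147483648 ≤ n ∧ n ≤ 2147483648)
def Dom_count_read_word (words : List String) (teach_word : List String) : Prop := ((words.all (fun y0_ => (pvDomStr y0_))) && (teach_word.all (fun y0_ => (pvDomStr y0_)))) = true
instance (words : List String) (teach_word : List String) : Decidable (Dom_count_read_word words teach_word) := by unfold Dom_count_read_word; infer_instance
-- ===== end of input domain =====

-- B replaces A's nested membership loop with break and flag by one character-deletion
-- translation table and counts the words that translate to the empty string (objective: alternative).

-- ===== PORT A =====
-- inner 'for x in list(word): if x not in teach_word: isRead = False; break' returning isRead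
def pvInnerA (teach_word : List String) : List Char → Bool
  | [] => true
  | x :: rest => if teach_word.contains (String.ofList [x]) = false then false else pvInnerA teach_word rest

def count_read_word (words : List String) (teach_word : List String) : Int :=
  words.foldl (fun cnt word => if pvInnerA teach_word word.toList then cnt + 1 else cnt) 0

-- ===== PORT B =====
-- table = {ord(t): None for t in teach_word if len(t) == 1}  (dict keys: first occurrences, in order)
def pvTable (teach_word : List String) : List Int :=
  PySem.Set.ofList (teach_word.filterMap (fun t =>
    match t.toList with
    | [c] => some ((c.toNat : Int))
    | _ => none))

-- word.translate(table): delete every character whose code is a key of the table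
def pvTranslate (table : List Int) (cs : List Char) : List Char :=
  cs.filter (fun c => table.contains ((c.toNat : Int)) = false)

-- sum(1 for word in words if not word.translate(table))
def count_read_word_alt (words : List String) (teach_word : List String) : Int :=
  let table := pvTable teach_word
  words.foldl (fun acc word => acc + (if (pvTranslate table word.toList).isEmpty then 1 else 0)) 0

-- ===== PRECONDITION & SPEC =====
def Spec_count_read_word (words : List String) (teach_word : List String) (out : Int) : Prop := out = count_read_word_alt words teach_word
instance (words : List String) (teach_word : List String) (out : Int) : Decidable (Spec_count_read_word words teach_word out) := by unfold Spec_count_read_word; infer_instance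

-- ===== CLAIM (what is proved, stated in full; the proofs are below) =====
def Claim_equal_count_read_word : Prop := ∀ (words : List String) (teach_word : List String), Dom_count_read_word words teach_word → Spec_count_read_word words teach_word (count_read_word words teach_word)

-- ===== LEMMAS AND PROOFS =====

-- a character's code is a table key iff its one-letter string is in teach_word
theorem pvTable_mem (teach_word : List String) (c : Char) :
    ((c.toNat : Int) ∈ pvTable teach_word) ↔ String.ofList [c] ∈ teach_word := by
  unfold pvTable
  rw [PySem.Set.mem_ofList, List.mem_filterMap]
  constructor
  · rintro ⟨t, ht, hmatch⟩
    cases hcs : t.toList with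
    | nil => rw [hcs] at hmatch; simp at hmatch
    | cons c' rest =>
      cases rest with
      | nil =>
        rw [hcs] at hmatch
        simp only [Option.some.injEq] at hmatch
        have hnat : c'.toNat = c.toNat := by exact_mod_cast hmatch
        have hc : c' = c := Char.ext (UInt32.toNat_inj.mp hnat)
        have ht' : t = String.ofList [c] := by
          rw [← hc, ← hcs]; exact String.ofList_toList.symm
        rwa [ht'] at ht
      | cons _ _ => rw [hcs] at hmatch; simp at hmatch
  · intro h
    exact ⟨String.ofList [c], h, by simp⟩

-- the per-character tests of the two ports agree (Bool form)
theorem pvKey (teach_word : List String) (c : Char) :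
    (pvTable teach_word).contains ((c.toNat : Int)) = teach_word.contains (String.ofList [c]) := by
  rw [Bool.eq_iff_iff]
  simp only [List.contains_iff_mem]
  exact pvTable_mem teach_word c

-- A's early-exit inner loop computes "all characters teachable"
theorem pvInnerA_eq_all (teach_word : List String) (cs : List Char) :
    pvInnerA teach_word cs = cs.all (fun c => teach_word.contains (String.ofList [c])) := by
  induction cs with
  | nil => rfl
  | cons x rest ih =>
      simp only [pvInnerA, List.all_cons, ih]
      cases h : teach_word.contains (String.ofList [x]) <;> simp

-- the per-word tests of the two ports agree
theorem pvStep_eq (teach_word : List String) (w : String) :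
    pvInnerA teach_word w.toList = (pvTranslate (pvTable teach_word) w.toList).isEmpty := by
  rw [pvInnerA_eq_all]
  unfold pvTranslate
  induction w.toList with
  | nil => rfl
  | cons c rest ih =>
      rw [List.all_cons, List.filter_cons, ← pvKey teach_word c]
      cases h : (pvTable teach_word).contains ((c.toNat : Int)) with
      | true => simpa using ih
      | false => simp

theorem pvFoldl_eq (teach_word : List String) (words : List String) (acc : Int) :
    words.foldl (fun cnt word => if pvInnerA teach_word word.toList then cnt + 1 else cnt) acc
      = words.foldl (fun a word => a + (if (pvTranslate (pvTable teach_word) word.toList).isEmpty then 1 else 0)) acc := by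
  induction words generalizing acc with
  | nil => rfl
  | cons w rest ih =>
      simp only [List.foldl_cons]
      rw [← pvStep_eq]
      cases pvInnerA teach_word w.toList <;> simp [ih]

-- ===== VERDICT (by name: the statement is the Claim_ definition above) =====
theorem count_read_word_spec : Claim_equal_count_read_word := by
  intro words teach_word _
  unfold Spec_count_read_word count_read_word count_read_word_alt
  exact pvFoldl_eq teach_word words 0
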